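-- pv_equiv track=rewrite | github.com/JimboJimbabwe/Season2Synackium | CreatorGenerator.py | generate_steps_content
-- ===== SOURCE A (Python) =====
-- def generate_steps_content(urls, endpoints_with_methods, params):
--     content = "##### Steps Taken:\n\n"
--
--     # Step 1: Go to Main URL
--     if urls:
--         content += f"1. Go to Main URL at: {urls[0]}\n"
--     else:
--         content += "1. Go to Main URL at: [URL NOT PROVIDED]\n"
--
--     # Step 2: Navigate
--     content += "2. Go to [Target Page/Functionality]\n"
--
--     # Step 3-9: Endpoint steps
--     step_num = 3
--     endpoints = [endpoint for endpoint, _ in endpoints_with_methods]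
--     methods = {endpoint: method for endpoint, method in endpoints_with_methods}
--
--     for endpoint in endpoints:
--         method = methods.get(endpoint, "GET")
--         content += f"{step_num}. On {endpoint} using {method} method do [Action]\n"
--         step_num += 1
--
--     content += f"{step_num}. Find in Burp Proxy\n"
--     step_num += 1
--     content += f"{step_num}. Send to Intruder\n"
--     step_num += 1
--
--     # Add steps for each endpoint's parameters
--     for endpoint in endpoints:
--         if endpoint in params and params[endpoint]:
--             param_list = ", ".join(params[endpoint])
--             method = methods.get(endpoint, "GET")
--             content += f"{step_num}. For {endpoint} ({method}) add payload position to {param_list}\n"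
--             step_num += 1
--
--     content += f"{step_num}. Load payloads from payloads.txt\n"
--     step_num += 1
--     content += f"{step_num}. Launch Attack\n"
--     step_num += 1
--     content += f"{step_num}. See results\n"
--
--     return content
-- ===== SOURCE B (Python) =====
-- def generate_steps_content(urls, endpoints_with_methods, params):
--     # Random-access formulation: the i-th step text is computed from the step
--     # number i by closed-form index arithmetic over precomputed section sizes,
--     # instead of sequentially threading a counter while concatenating.
--     methods = dict(endpoints_with_methods)
--     eps = [e for e, _ in endpoints_with_methods]
--     pep = [e for e in eps if e in params and params[e]]
--     n, m = len(eps), len(pep)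
--
--     def line(i):
--         if i == 1:
--             return "Go to Main URL at: " + (urls[0] if urls else "[URL NOT PROVIDED]")
--         if i == 2:
--             return "Go to [Target Page/Functionality]"
--         if i <= 2 + n:
--             e = eps[i - 3]
--             return f"On {e} using {methods.get(e, 'GET')} method do [Action]"
--         if i == 3 + n:
--             return "Find in Burp Proxy"
--         if i == 4 + n:
--             return "Send to Intruder"
--         if i <= 4 + n + m:
--             e = pep[i - 5 - n]
--             return f"For {e} ({methods.get(e, 'GET')}) add payload position to {', '.join(params[e])}"
--         if i == 5 + n + m:
--             return "Load payloads from payloads.txt"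
--         if i == 6 + n + m:
--             return "Launch Attack"
--         return "See results"
--
--     return "##### Steps Taken:\n\n" + "".join(f"{i}. {line(i)}\n" for i in range(1, 8 + n + m))
-- ===== Notes on version B (the rewrite author's own statement) =====
-- stated objective: alternative
-- what changed: B is a random-access formulation: it precomputes the two section sizes (number of endpoints and number of endpoints with non-empty params) and defines a function line(i) that maps a step NUMBER to its text by closed-form index arithmetic (branching on which section i falls in and indexing eps/pep directly), then emits range(1, 8+n+m); A instead makes two sequential passes over the endpoints threading a step_num accumulator through string concatenation.
import Mathlib
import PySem

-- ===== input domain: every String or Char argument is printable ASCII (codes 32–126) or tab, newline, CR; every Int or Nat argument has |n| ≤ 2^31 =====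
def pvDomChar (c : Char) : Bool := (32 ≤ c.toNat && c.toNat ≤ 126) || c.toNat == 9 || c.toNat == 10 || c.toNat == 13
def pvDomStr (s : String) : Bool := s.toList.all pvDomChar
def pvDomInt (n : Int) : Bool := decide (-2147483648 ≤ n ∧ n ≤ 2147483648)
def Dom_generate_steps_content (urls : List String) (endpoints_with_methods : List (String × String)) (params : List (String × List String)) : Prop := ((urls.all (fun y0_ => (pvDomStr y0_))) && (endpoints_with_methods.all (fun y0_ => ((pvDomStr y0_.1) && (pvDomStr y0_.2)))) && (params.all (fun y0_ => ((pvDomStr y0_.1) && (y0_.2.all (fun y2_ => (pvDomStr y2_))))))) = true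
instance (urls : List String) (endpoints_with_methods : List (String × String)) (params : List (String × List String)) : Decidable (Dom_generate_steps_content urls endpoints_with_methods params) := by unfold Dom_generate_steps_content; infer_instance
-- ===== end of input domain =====

-- B computes each step text from its step NUMBER by closed-form index arithmetic over
-- precomputed section sizes (a random-access line(i) over range(1, 8+n+m)) instead of
-- A's two sequential endpoint passes threading a step_num accumulator: objective 'alternative'.

-- ===== PORT A =====
def generate_steps_content (urls : List String) (endpoints_with_methods : List (String × String)) (params : List (String × List String)) : String :=
  let content := "##### Steps Taken:\n\n"
  let content := content ++ (match urls with
    | u :: _ => "1. Go to Main URL at: " ++ u ++ "\n"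
    | [] => "1. Go to Main URL at: [URL NOT PROVIDED]\n")
  let content := content ++ "2. Go to [Target Page/Functionality]\n"
  let endpoints : List String := endpoints_with_methods.map (fun p => p.1)
  let methods : PySem.Dict String String :=
    endpoints_with_methods.foldl (fun d p => d.insert p.1 p.2) PySem.Dict.empty
  let st := endpoints.foldl (fun (acc : String × Int) e =>
      (acc.1 ++ PySem.Int.toStr acc.2 ++ ". On " ++ e ++ " using " ++ methods.getD e "GET" ++ " method do [Action]\n",
       acc.2 + 1)) (content, (3 : Int))
  let content := st.1 ++ PySem.Int.toStr st.2 ++ ". Find in Burp Proxy\n"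
  let step_num := st.2 + 1
  let content := content ++ PySem.Int.toStr step_num ++ ". Send to Intruder\n"
  let step_num := step_num + 1
  let st2 := endpoints.foldl (fun (acc : String × Int) e =>
      match (PySem.Dict.mk params).get? e with
      | some ps =>
        if ps = [] then acc
        else (acc.1 ++ PySem.Int.toStr acc.2 ++ ". For " ++ e ++ " (" ++ methods.getD e "GET" ++ ") add payload position to " ++ PySem.Str.join ", " ps ++ "\n",
              acc.2 + 1)
      | none => acc) (content, step_num)
  let content := st2.1 ++ PySem.Int.toStr st2.2 ++ ". Load payloads from payloads.txt\n"
  let step_num := st2.2 + 1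
  let content := content ++ PySem.Int.toStr step_num ++ ". Launch Attack\n"
  let step_num := step_num + 1
  content ++ PySem.Int.toStr step_num ++ ". See results\n"

-- ===== PORT B =====
-- line(i) of Source B: maps a step number to its text by index arithmetic.
-- eps[i-3] / pep[i-5-n] are ported with pyGetD; on every call Source B actually makes
-- (3 ≤ i ≤ 2+n resp. 5+n ≤ i ≤ 4+n+m) the index is in range, so pyGetD is exact there;
-- likewise params[e] for e ∈ pep is a present key, so get?.getD [] is exact there.
def pvLine (urls : List String) (eps pep : List String) (methods : PySem.Dict String String)
    (params : List (String × List String)) (n m i : Int) : String :=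
  if i = 1 then
    "Go to Main URL at: " ++ (match urls with | u :: _ => u | [] => "[URL NOT PROVIDED]")
  else if i = 2 then "Go to [Target Page/Functionality]"
  else if i ≤ 2 + n then
    let e := PySem.List.pyGetD eps (i - 3) ""
    "On " ++ e ++ " using " ++ methods.getD e "GET" ++ " method do [Action]"
  else if i = 3 + n then "Find in Burp Proxy"
  else if i = 4 + n then "Send to Intruder"
  else if i ≤ 4 + n + m then
    let e := PySem.List.pyGetD pep (i - 5 - n) ""
    "For " ++ e ++ " (" ++ methods.getD e "GET" ++ ") add payload position to " ++
      PySem.Str.join ", " (((PySem.Dict.mk params).get? e).getD [])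
  else if i = 5 + n + m then "Load payloads from payloads.txt"
  else if i = 6 + n + m then "Launch Attack"
  else "See results"

def generate_steps_content_alt (urls : List String) (endpoints_with_methods : List (String × String)) (params : List (String × List String)) : String :=
  let methods : PySem.Dict String String :=
    endpoints_with_methods.foldl (fun d p => d.insert p.1 p.2) PySem.Dict.empty
  let eps : List String := endpoints_with_methods.map (fun p => p.1)
  let pep : List String := eps.filter (fun e =>
    match (PySem.Dict.mk params).get? e with
    | some ps => !ps.isEmpty
    | none => false)
  let n : Int := eps.length
  let m : Int := pep.length
  "##### Steps Taken:\n\n" ++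
    (PySem.List.pyRange 1 (8 + n + m) 1).foldl
      (fun acc i => acc ++ PySem.Int.toStr i ++ ". " ++ pvLine urls eps pep methods params n m i ++ "\n") ""

-- ===== PRECONDITION & SPEC =====
def Spec_generate_steps_content (urls : List String) (endpoints_with_methods : List (String × String)) (params : List (String × List String)) (out : String) : Prop := out = generate_steps_content_alt urls endpoints_with_methods params
instance (urls : List String) (endpoints_with_methods : List (String × String)) (params : List (String × List String)) (out : String) : Decidable (Spec_generate_steps_content urls endpoints_with_methods params out) := by unfold Spec_generate_steps_content; infer_instance

-- ===== CLAIM (what is proved, stated in full; the proofs are below) =====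
def Claim_equal_generate_steps_content : Prop := ∀ (urls : List String) (endpoints_with_methods : List (String × String)) (params : List (String × List String)), Dom_generate_steps_content urls endpoints_with_methods params → Spec_generate_steps_content urls endpoints_with_methods params (generate_steps_content urls endpoints_with_methods params)

-- ===== LEMMAS AND PROOFS =====

def pvLines : List String → Int → String
  | [], _ => ""
  | t :: ts, n => (PySem.Int.toStr n ++ ". " ++ t ++ "\n") ++ pvLines ts (n + 1)

lemma pvLines_append (ts us : List String) : ∀ n : Int,
    pvLines (ts ++ us) n = pvLines ts n ++ pvLines us (n + ts.length) := by
  induction ts with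
  | nil => intro n; simp [pvLines]
  | cons t ts ih =>
    intro n
    have h : n + ((ts.length : Int) + 1) = (n + 1) + ts.length := by ring
    simp only [List.cons_append, pvLines, ih, List.length_cons, String.append_assoc]
    push_cast
    rw [h]

-- the list of B's step texts, in order (proof-side description of pvLine's sections)
def pvSteps (urls : List String) (eps pep : List String) (methods : PySem.Dict String String)
    (params : List (String × List String)) : List String :=
  ("Go to Main URL at: " ++ (match urls with | u :: _ => u | [] => "[URL NOT PROVIDED]")) ::
  "Go to [Target Page/Functionality]" ::
  (eps.map (fun e => "On " ++ e ++ " using " ++ methods.getD e "GET" ++ " method do [Action]")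
   ++ "Find in Burp Proxy" :: "Send to Intruder" ::
   (pep.map (fun e => "For " ++ e ++ " (" ++ methods.getD e "GET" ++ ") add payload position to " ++
       PySem.Str.join ", " (((PySem.Dict.mk params).get? e).getD []))
    ++ ["Load payloads from payloads.txt", "Launch Attack", "See results"]))

lemma fold_lines (L : Int → String) :
    ∀ (S : List String) (k : Int) (c : String),
    (∀ j : Nat, j < S.length → L (k + j) = S.getD j "") →
    (PySem.List.pyRange k (k + S.length) 1).foldl
      (fun acc i => acc ++ PySem.Int.toStr i ++ ". " ++ L i ++ "\n") c
    = c ++ pvLines S k := by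
  intro S
  induction S with
  | nil =>
    intro k c _
    simp [pvLines, PySem.List.pyRange_one_eq_nil (by omega : k + ((0:Nat):Int) ≤ k)]
  | cons s S ih =>
    intro k c hL
    have hlen : k + (((s :: S).length : Nat) : Int) = (k + 1) + (S.length : Int) := by
      push_cast; simp; ring
    rw [hlen, PySem.List.pyRange_one_cons (by omega)]
    simp only [List.foldl_cons]
    have h0 := hL 0 (by simp)
    simp only [Nat.cast_zero, add_zero, List.getD] at h0
    rw [ih (k + 1) _ (fun j hj => by
      have := hL (j + 1) (by simpa using Nat.succ_lt_succ hj)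
      push_cast at this ⊢
      rw [show k + 1 + (j : Int) = k + ((j : Int) + 1) by ring]
      simpa using this)]
    simp only [pvLines, h0, String.append_assoc]
    simp [List.getD]

lemma pvLine_at (urls : List String) (eps pep : List String) (methods : PySem.Dict String String)
    (params : List (String × List String)) :
    ∀ j : Nat, j < 7 + eps.length + pep.length →
    pvLine urls eps pep methods params eps.length pep.length (1 + (j : Int))
      = (pvSteps urls eps pep methods params).getD j "" := by
  intro j hj
  rcases j with _ | _ | j
  · simp [pvLine, pvSteps, List.getD]
  · norm_num [pvLine, pvSteps, List.getD]
  · have hi : (1 + (((j + 1 + 1 : Nat)) : Int)) = (j : Int) + 3 := by push_cast; ring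
    rw [hi]
    have hj' : j < 5 + eps.length + pep.length := by omega
    unfold pvLine
    rw [if_neg (by omega), if_neg (by omega)]
    simp only [pvSteps, List.getD_cons_succ]
    by_cases hA : j < eps.length
    · rw [if_pos (by push_cast; omega)]
      rw [List.getD_append _ _ _ _ (by simpa using hA),
        List.getD_eq_getElem _ _ (by simpa using hA), List.getElem_map]
      rw [show ((j : Int) + 3 - 3) = ((j : Nat) : Int) from by ring, PySem.List.pyGetD_natCast,
        List.getD_eq_getElem _ _ hA]
    · rw [if_neg (by push_cast; omega)]
      rw [List.getD_append_right _ _ _ _ (by simpa using not_lt.mp hA)]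
      simp only [List.length_map]
      by_cases hF : j = eps.length
      · rw [if_pos (by push_cast; omega)]
        simp [hF]
      · by_cases hS : j = eps.length + 1
        · rw [if_neg (by push_cast; omega), if_pos (by push_cast; omega)]
          rw [show j - eps.length = 1 from by omega]
          simp [List.getD]
        · rw [if_neg (by push_cast; omega), if_neg (by push_cast; omega)]
          rw [show j - eps.length = (j - eps.length - 2) + 1 + 1 from by omega,
            List.getD_cons_succ, List.getD_cons_succ]
          by_cases hP : j < eps.length + 2 + pep.length
          · rw [if_pos (by push_cast; omega)]
            have hP' : j - eps.length - 2 < pep.length := by omega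
            rw [List.getD_append _ _ _ _ (by simpa using hP'),
              List.getD_eq_getElem _ _ (by simpa using hP'), List.getElem_map]
            rw [show ((j : Int) + 3 - 5 - (eps.length : Int)) = ((j - eps.length - 2 : Nat) : Int) from by omega,
              PySem.List.pyGetD_natCast, List.getD_eq_getElem _ _ hP']
          · rw [if_neg (by push_cast; omega)]
            rw [List.getD_append_right _ _ _ _ (by simp; omega)]
            simp only [List.length_map]
            by_cases hL : j = eps.length + 2 + pep.length
            · rw [if_pos (by push_cast; omega)]
              rw [show j - eps.length - 2 - pep.length = 0 from by omega]
              rfl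
            · by_cases hK : j = eps.length + 3 + pep.length
              · rw [if_neg (by push_cast; omega), if_pos (by push_cast; omega)]
                rw [show j - eps.length - 2 - pep.length = 1 from by omega]
                rfl
              · rw [if_neg (by push_cast; omega), if_neg (by push_cast; omega)]
                rw [show j - eps.length - 2 - pep.length = 2 from by omega]
                rfl

-- filter-then-describe (B's pep) equals A's filterMap over all endpoints
lemma pvPep (methods : PySem.Dict String String) (params : List (String × List String)) :
    ∀ eps : List String,
    ((eps.filter (fun e =>
        match (PySem.Dict.mk params).get? e with
        | some ps => !ps.isEmpty
        | none => false)).map (fun e =>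
        "For " ++ e ++ " (" ++ methods.getD e "GET" ++ ") add payload position to " ++
          PySem.Str.join ", " (((PySem.Dict.mk params).get? e).getD [])))
    = eps.filterMap (fun e =>
        match (PySem.Dict.mk params).get? e with
        | some ps =>
          if ps = [] then none
          else some ("For " ++ e ++ " (" ++ methods.getD e "GET" ++ ") add payload position to " ++ PySem.Str.join ", " ps)
        | none => none) := by
  intro eps
  induction eps with
  | nil => simp
  | cons e eps ih =>
    simp only [List.filter_cons, List.filterMap_cons]
    cases hq : (PySem.Dict.mk params).get? e with
    | none => simpa [hq] using ih
    | some ps =>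
      by_cases hps : ps = []
      · simp [hq, hps, ih]
      · simp [hq, hps, List.isEmpty_iff, ih]

lemma pvToStr_one : PySem.Int.toStr 1 = "1" := by decide
lemma pvToStr_two : PySem.Int.toStr 2 = "2" := by decide
lemma pvLit_main : ("1. Go to Main URL at: " : String) = "1" ++ ". " ++ "Go to Main URL at: " := by decide
lemma pvLit_mainNP : ("1. Go to Main URL at: [URL NOT PROVIDED]\n" : String) = "1" ++ ". " ++ "Go to Main URL at: [URL NOT PROVIDED]" ++ "\n" := by decide
lemma pvLit_nav : ("2. Go to [Target Page/Functionality]\n" : String) = "2" ++ ". " ++ "Go to [Target Page/Functionality]" ++ "\n" := by decide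
lemma pvLit_on : (". On " : String) = ". " ++ "On " := by decide
lemma pvLit_act : (" method do [Action]\n" : String) = " method do [Action]" ++ "\n" := by decide
lemma pvLit_for : (". For " : String) = ". " ++ "For " := by decide
lemma pvLit_find : (". Find in Burp Proxy\n" : String) = ". " ++ "Find in Burp Proxy" ++ "\n" := by decide
lemma pvLit_send : (". Send to Intruder\n" : String) = ". " ++ "Send to Intruder" ++ "\n" := by decide
lemma pvLit_load : (". Load payloads from payloads.txt\n" : String) = ". " ++ "Load payloads from payloads.txt" ++ "\n" := by decide
lemma pvLit_launch : (". Launch Attack\n" : String) = ". " ++ "Launch Attack" ++ "\n" := by decide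
lemma pvLit_see : (". See results\n" : String) = ". " ++ "See results" ++ "\n" := by decide

lemma pvFoldl_lines_map {α : Type} (f : α → String) :
    ∀ (xs : List α) (c : String) (n : Int),
    xs.foldl (fun (acc : String × Int) e =>
      (acc.1 ++ (PySem.Int.toStr acc.2 ++ ". " ++ f e ++ "\n"), acc.2 + 1)) (c, n)
    = (c ++ pvLines (xs.map f) n, n + (xs.map f).length) := by
  intro xs
  induction xs with
  | nil => intro c n; simp [pvLines]
  | cons x xs ih =>
    intro c n
    simp only [List.foldl_cons]
    rw [ih]
    simp only [List.map_cons, pvLines, List.length_cons, String.append_assoc, Prod.mk.injEq]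
    refine ⟨trivial, ?_⟩
    push_cast
    ring

lemma pvFoldl_lines_opt (q : String → Option (List String)) (T : String → List String → String) :
    ∀ (xs : List String) (c : String) (n : Int),
    xs.foldl (fun (acc : String × Int) e =>
      match q e with
      | some ps =>
        if ps = [] then acc
        else (acc.1 ++ (PySem.Int.toStr acc.2 ++ ". " ++ T e ps ++ "\n"), acc.2 + 1)
      | none => acc) (c, n)
    = (c ++ pvLines (xs.filterMap (fun e =>
        match q e with
        | some ps => if ps = [] then none else some (T e ps)
        | none => none)) n,
       n + (xs.filterMap (fun e =>
        match q e with
        | some ps => if ps = [] then none else some (T e ps)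
        | none => none)).length) := by
  intro xs
  induction xs with
  | nil => intro c n; simp [pvLines]
  | cons x xs ih =>
    intro c n
    simp only [List.foldl_cons, List.filterMap_cons]
    cases hx : q x with
    | none => simp only; rw [ih]
    | some ps =>
      by_cases hps : ps = []
      · simp only [hps, if_pos]
        rw [ih]
      · simp only [if_neg hps]
        rw [ih]
        simp only [pvLines, List.length_cons, String.append_assoc, Prod.mk.injEq]
        refine ⟨trivial, ?_⟩
        push_cast
        ring

-- A's accumulator-threading output equals header ++ numbered lines of the section list
lemma pvMaster (urls : List String) (E : List String) (m : String → String)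
    (q : String → Option (List String)) :
  (let content := "##### Steps Taken:\n\n"
   let content := content ++ (match urls with
     | u :: _ => "1. Go to Main URL at: " ++ u ++ "\n"
     | [] => "1. Go to Main URL at: [URL NOT PROVIDED]\n")
   let content := content ++ "2. Go to [Target Page/Functionality]\n"
   let st := E.foldl (fun (acc : String × Int) e =>
       (acc.1 ++ PySem.Int.toStr acc.2 ++ ". On " ++ e ++ " using " ++ m e ++ " method do [Action]\n",
        acc.2 + 1)) (content, (3 : Int))
   let content := st.1 ++ PySem.Int.toStr st.2 ++ ". Find in Burp Proxy\n"
   let step_num := st.2 + 1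
   let content := content ++ PySem.Int.toStr step_num ++ ". Send to Intruder\n"
   let step_num := step_num + 1
   let st2 := E.foldl (fun (acc : String × Int) e =>
       match q e with
       | some ps =>
         if ps = [] then acc
         else (acc.1 ++ PySem.Int.toStr acc.2 ++ ". For " ++ e ++ " (" ++ m e ++ ") add payload position to " ++ PySem.Str.join ", " ps ++ "\n",
               acc.2 + 1)
       | none => acc) (content, step_num)
   let content := st2.1 ++ PySem.Int.toStr st2.2 ++ ". Load payloads from payloads.txt\n"
   let step_num := st2.2 + 1
   let content := content ++ PySem.Int.toStr step_num ++ ". Launch Attack\n"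
   let step_num := step_num + 1
   content ++ PySem.Int.toStr step_num ++ ". See results\n")
  =
  "##### Steps Taken:\n\n" ++
    pvLines ((match urls with
        | u :: _ => "Go to Main URL at: " ++ u
        | [] => "Go to Main URL at: [URL NOT PROVIDED]") ::
      "Go to [Target Page/Functionality]" ::
      (E.map (fun e => "On " ++ e ++ " using " ++ m e ++ " method do [Action]")
       ++ "Find in Burp Proxy" :: "Send to Intruder" ::
       (E.filterMap (fun e =>
           match q e with
           | some ps =>
             if ps = [] then none
             else some ("For " ++ e ++ " (" ++ m e ++ ") add payload position to " ++ PySem.Str.join ", " ps)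
           | none => none)
        ++ ["Load payloads from payloads.txt", "Launch Attack", "See results"]))) 1 := by
  have hfun1 : (fun (acc : String × Int) e =>
      (acc.1 ++ PySem.Int.toStr acc.2 ++ ". On " ++ e ++ " using " ++ m e ++ " method do [Action]\n",
       acc.2 + 1))
    = (fun (acc : String × Int) e =>
      (acc.1 ++ (PySem.Int.toStr acc.2 ++ ". " ++ ("On " ++ e ++ " using " ++ m e ++ " method do [Action]") ++ "\n"),
       acc.2 + 1)) := by
    funext acc e
    rw [pvLit_on, pvLit_act]
    simp only [String.append_assoc]
  have hfun2 : (fun (acc : String × Int) e =>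
      match q e with
      | some ps =>
        if ps = [] then acc
        else (acc.1 ++ PySem.Int.toStr acc.2 ++ ". For " ++ e ++ " (" ++ m e ++ ") add payload position to " ++ PySem.Str.join ", " ps ++ "\n",
              acc.2 + 1)
      | none => acc)
    = (fun (acc : String × Int) e =>
      match q e with
      | some ps =>
        if ps = [] then acc
        else (acc.1 ++ (PySem.Int.toStr acc.2 ++ ". " ++ ((fun e ps => "For " ++ e ++ " (" ++ m e ++ ") add payload position to " ++ PySem.Str.join ", " ps) e ps) ++ "\n"),
              acc.2 + 1)
      | none => acc) := by
    funext acc e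
    cases q e with
    | none => rfl
    | some ps =>
      by_cases hps : ps = []
      · simp [hps]
      · simp only [if_neg hps]
        rw [pvLit_for]
        simp only [String.append_assoc]
  dsimp only
  rw [hfun1, pvFoldl_lines_map, hfun2, pvFoldl_lines_opt]
  dsimp only
  simp only [pvLines, pvLines_append, List.length_cons, List.length_append, List.length_map,
    List.length_nil, String.append_empty, String.append_assoc]
  cases urls with
  | nil =>
    dsimp only
    push_cast
    ring_nf
    rw [pvLit_mainNP, pvLit_nav, pvToStr_one, pvToStr_two,
      pvLit_find, pvLit_send, pvLit_load, pvLit_launch, pvLit_see]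
    simp only [String.append_assoc]
  | cons u us =>
    dsimp only
    push_cast
    ring_nf
    rw [pvLit_main, pvLit_nav, pvToStr_one, pvToStr_two,
      pvLit_find, pvLit_send, pvLit_load, pvLit_launch, pvLit_see]
    simp only [String.append_assoc]

-- ===== VERDICT (by name: the statement is the Claim_ definition above) =====
set_option maxHeartbeats 1000000 in
theorem generate_steps_content_spec : Claim_equal_generate_steps_content := by
  intro urls ewm params _
  unfold Spec_generate_steps_content generate_steps_content generate_steps_content_alt
  dsimp only
  have hA := pvMaster urls (ewm.map (fun p => p.1))
    (fun e => (ewm.foldl (fun d p => d.insert p.1 p.2) PySem.Dict.empty).getD e "GET")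
    (fun e => (PySem.Dict.mk params).get? e)
  dsimp only at hA
  rw [hA]
  set E : List String := ewm.map (fun p => p.1) with hE
  set Q : List String := E.filter (fun e =>
    match (PySem.Dict.mk params).get? e with
    | some ps => !ps.isEmpty
    | none => false) with hQ
  set M : PySem.Dict String String :=
    ewm.foldl (fun d p => d.insert p.1 p.2) PySem.Dict.empty with hM
  have hlen : ((8 : Int) + (E.length : Int) + (Q.length : Int))
      = 1 + ((pvSteps urls E Q M params).length : Int) := by
    simp only [pvSteps, List.length_cons, List.length_append, List.length_map, List.length_nil]
    push_cast
    ring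
  rw [hlen]
  have hB := fold_lines (pvLine urls E Q M params E.length Q.length)
    (pvSteps urls E Q M params) 1 ""
    (fun j hj => pvLine_at urls E Q M params j (by
      simp only [pvSteps, List.length_cons, List.length_append, List.length_map,
        List.length_nil] at hj
      omega))
  rw [hB, String.empty_append]
  congr 1
  simp only [pvSteps]
  rw [hQ, pvPep]
  cases urls with
  | nil =>
    rw [show ("Go to Main URL at: " ++ "[URL NOT PROVIDED]" : String)
        = "Go to Main URL at: [URL NOT PROVIDED]" from by decide]
  | cons u us => rfl
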